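-- pv_equiv track=rewrite | github.com/pypi-data/pypi-mirror-379 | packages/booleangene/booleangene-0.0.3-py3-none-any.whl/booleangene/modules/canalizing_analysis.py | canalize
-- ===== SOURCE A (Python) =====
-- def canalize(minterms):
--
--     minterms_lst = minterms[0]
--     variables_lst = minterms[1]
--
--     def find_all_possible_rows(variable_name, variable_value):
--
--         out = set()
--         ix = variables_lst.index(variable_name)
--         end = 2**len(variables_lst)
--
--         for i in range(end):
--             binary_num = bin(i)[2:]
--             binary_num = '0'*(len(variables_lst) - len(binary_num)) + binary_num
--             if int(binary_num[ix]) == int(variable_value):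
--                 out.update({i})
--         return out
--
--
--     def check_canalizability(variable_name, variable_value):
--
--         possible = find_all_possible_rows(variable_name, variable_value)
--         overlap = possible.intersection(set(minterms_lst))
--
--         if overlap == set():
--             return False
--         elif overlap == possible:
--             return True
--         return None
--
--     def extra(num):
--         if num == 0:
--             return "NOT "
--         return ""
--
--     for variable in variables_lst:
--         for value in {True, False}:
--             canalizable = check_canalizability(variable, value)
--             if canalizable is not None:
--                 return extra(int(value)) + variable, canalizable
-- ===== SOURCE B (Python) =====
-- def canalize(minterms):
--     minterms_lst, variables_lst = minterms
--     n = len(variables_lst)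
--     limit = 2 ** n
--     rows = {m for m in minterms_lst if 0 <= m < limit}
--     half = limit // 2
--     first_ix = {}
--     for i, v in enumerate(variables_lst):
--         if v not in first_ix:
--             first_ix[v] = i
--     for variable in variables_lst:
--         shift = n - 1 - first_ix[variable]
--         for value in (False, True):
--             cnt = 0
--             for m in rows:
--                 if ((m >> shift) & 1) == (1 if value else 0):
--                     cnt += 1
--             if cnt == 0:
--                 return ("NOT " if not value else "") + variable, False
--             if cnt == half:
--                 return ("NOT " if not value else "") + variable, True
--     return None
-- ===== Notes on version B (the rewrite author's own statement) =====
-- stated objective: faster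
-- what changed: A enumerates all 2^n truth-table rows per variable/value, builds the 'possible' row set and intersects it with the minterms; B never enumerates rows: it makes one pass collecting the distinct in-range minterms and, per variable/value, counts those whose bit (tested by shift-and-mask) matches the value, deciding canalizability by count == 0 or count == 2^(n-1).
import Mathlib
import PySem

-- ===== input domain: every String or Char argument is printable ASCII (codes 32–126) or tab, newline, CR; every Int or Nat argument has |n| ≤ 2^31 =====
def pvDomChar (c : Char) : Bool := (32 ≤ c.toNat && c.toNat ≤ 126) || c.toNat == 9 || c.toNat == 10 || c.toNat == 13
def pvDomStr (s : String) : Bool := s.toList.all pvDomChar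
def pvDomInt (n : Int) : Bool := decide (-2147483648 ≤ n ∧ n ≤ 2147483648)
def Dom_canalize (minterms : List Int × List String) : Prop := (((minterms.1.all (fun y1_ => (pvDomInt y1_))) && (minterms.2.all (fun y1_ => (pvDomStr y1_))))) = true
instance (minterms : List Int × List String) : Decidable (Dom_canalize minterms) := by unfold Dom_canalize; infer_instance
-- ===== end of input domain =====

-- B replaces A's per-variable enumeration of all 2^n truth-table rows by a single counting pass
-- over the deduplicated in-range minterms per variable/value (bit test + count = 2^(n-1) check).

-- ===== PORT A =====
def canalizeExtra (num : Int) : String :=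
  if num = 0 then "NOT " else ""

-- find_all_possible_rows: in every call variable_name ∈ variables_lst, so list.index and the
-- string indexing binary_num[ix] never raise; their (unreachable) raise-defaults are 0 / ' '.
def canalizeFindRows (variables_lst : List String) (variable_name : String)
    (variable_value : Bool) : PySem.Set Int :=
  let ix : Int := ((PySem.List.index? variables_lst variable_name).getD 0 : Nat)
  let endv : Int := 2 ^ variables_lst.length
  (PySem.List.pyRange 0 endv 1).foldl (fun out i =>
    let b1 : List Char := PySem.List.slice (PySem.Int.toBinChars0b i) (some 2) none  -- bin(i)[2:]
    let b2 : List Char :=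
      PySem.List.pyRepeat ['0'] ((variables_lst.length : Int) - b1.length) ++ b1
    if (PySem.Int.ofChars? [PySem.List.pyGetD b2 ix ' ']).getD 0
        = (if variable_value then (1 : Int) else 0) then
      PySem.Set.update out (PySem.Set.ofList [i])   -- out.update({i})
    else out) PySem.Set.empty

def canalizeCheck (minterms_lst : List Int) (variables_lst : List String)
    (variable_name : String) (variable_value : Bool) : Option Bool :=
  let possible := canalizeFindRows variables_lst variable_name variable_value
  let overlap := PySem.Set.inter possible (PySem.Set.ofList minterms_lst)
  if PySem.Set.equal overlap PySem.Set.empty then some false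
  else if PySem.Set.equal overlap possible then some true
  else none

-- 'for value in {True, False}': CPython iterates this two-element set as [False, True]; unrolled.
def canalizeLoop (minterms_lst : List Int) (variables_lst : List String) :
    List String → Option (String × Bool)
  | [] => none
  | v :: rest =>
    match canalizeCheck minterms_lst variables_lst v false with
    | some c => some (canalizeExtra 0 ++ v, c)
    | none =>
      match canalizeCheck minterms_lst variables_lst v true with
      | some c => some (canalizeExtra 1 ++ v, c)
      | none => canalizeLoop minterms_lst variables_lst rest

def canalize (minterms : List Int × List String) : Option (String × Bool) :=
  canalizeLoop minterms.1 minterms.2 minterms.2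

-- ===== PORT B =====
-- cnt is a sum over the set 'rows' (order-independent), so iterating the Set's list is exact.
def canalizeAltCount (rows : PySem.Set Int) (shift : Int) (value : Bool) : Int :=
  rows.foldl (fun cnt (m : Int) =>
    if PySem.Int.band (m >>> shift.toNat) 1 = (if value then (1 : Int) else 0) then cnt + 1
    else cnt) 0

def canalizeAltTry (rows : PySem.Set Int) (shift : Int) (half : Int) (vbl : String)
    (value : Bool) : Option (String × Bool) :=
  let cnt := canalizeAltCount rows shift value
  if cnt = 0 then some ((if !value then "NOT " else "") ++ vbl, false)
  else if cnt = half then some ((if !value then "NOT " else "") ++ vbl, true)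
  else none

-- in every call v is a key of firstIx and shift = n-1-first_ix[v] ≥ 0, so the lookup default 0
-- and the .toNat in the (Python-raising-on-negative) right shift are unreachable.
def canalizeAltLoop (rows : PySem.Set Int) (firstIx : PySem.Dict String Int) (n : Nat)
    (half : Int) : List String → Option (String × Bool)
  | [] => none
  | v :: rest =>
    let shift : Int := (n : Int) - 1 - firstIx.getD v 0
    match canalizeAltTry rows shift half v false with
    | some r => some r
    | none =>
      match canalizeAltTry rows shift half v true with
      | some r => some r
      | none => canalizeAltLoop rows firstIx n half rest

def canalize_alt (minterms : List Int × List String) : Option (String × Bool) :=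
  let ms := minterms.1
  let vs := minterms.2
  let n := vs.length
  let limit : Int := 2 ^ n
  let rows : PySem.Set Int := PySem.Set.ofList (ms.filter (fun m => decide (0 ≤ m ∧ m < limit)))
  let half : Int := PySem.Int.floordiv limit 2
  let firstIx : PySem.Dict String Int :=
    (PySem.List.enumerate vs).foldl
      (fun d p => if d.contains p.2 then d else d.insert p.2 p.1) PySem.Dict.empty
  canalizeAltLoop rows firstIx n half vs

-- ===== PRECONDITION & SPEC =====
def Spec_canalize (minterms : List Int × List String) (out : Option (String × Bool)) : Prop := out = canalize_alt minterms
instance (minterms : List Int × List String) (out : Option (String × Bool)) : Decidable (Spec_canalize minterms out) := by unfold Spec_canalize; infer_instance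

-- ===== CLAIM (what is proved, stated in full; the proofs are below) =====
def Claim_equal_canalize : Prop := ∀ (minterms : List Int × List String), Dom_canalize minterms → Spec_canalize minterms (canalize minterms)

-- ===== LEMMAS AND PROOFS =====

-- ---- Nat.toDigits 2 recursion ----
theorem pv_tdc_acc (n : Nat) : ∀ (f : Nat) (rest : List Char), n < f →
    Nat.toDigitsCore 2 f n rest = Nat.toDigits 2 n ++ rest := by
  induction n using Nat.strong_induction_on with
  | _ n ih =>
    intro f rest hf
    match f, hf with
    | f+1, _ =>
      by_cases h2 : n / 2 = 0
      · simp [Nat.toDigits, Nat.toDigitsCore, h2]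
      · have e1 : Nat.toDigitsCore 2 (f+1) n rest
            = Nat.toDigitsCore 2 f (n/2) (Nat.digitChar (n%2) :: rest) := by
          simp [Nat.toDigitsCore, h2]
        have e2 : Nat.toDigits 2 n
            = Nat.toDigitsCore 2 n (n/2) [Nat.digitChar (n%2)] := by
          simp [Nat.toDigits, Nat.toDigitsCore, h2]
        rw [e1, ih (n/2) (by omega) f _ (by omega), e2,
            ih (n/2) (by omega) n _ (by omega)]
        simp

theorem pv_toDigits_two_lt (m : Nat) (h : m < 2) : Nat.toDigits 2 m = [Nat.digitChar m] := by
  have h2 : m / 2 = 0 := by omega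
  have h3 : m % 2 = m := by omega
  simp [Nat.toDigits, Nat.toDigitsCore, h2, h3]

theorem pv_toDigits_two_ge (m : Nat) (h : 2 ≤ m) :
    Nat.toDigits 2 m = Nat.toDigits 2 (m/2) ++ [Nat.digitChar (m%2)] := by
  have h2 : ¬ (m / 2 = 0) := by omega
  have e : Nat.toDigits 2 m = Nat.toDigitsCore 2 m (m/2) [Nat.digitChar (m%2)] := by
    simp [Nat.toDigits, Nat.toDigitsCore, h2]
  rw [e, pv_tdc_acc (m/2) m _ (by omega)]

-- ---- the padded binary string is the bit string, MSB first ----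
def pvBitChar (m j : Nat) : Char := if m.testBit j then '1' else '0'

theorem pv_bitChar_zero (m : Nat) : pvBitChar m 0 = Nat.digitChar (m % 2) := by
  rcases Nat.mod_two_eq_zero_or_one m with h | h <;>
    simp [pvBitChar, Nat.testBit_zero, h] <;> decide

theorem pv_padbin : ∀ (n m : Nat), 0 < n → m < 2^n →
    List.replicate (n - (Nat.toDigits 2 m).length) '0' ++ Nat.toDigits 2 m
      = (List.range n).map (fun j => pvBitChar m (n-1-j)) := by
  intro n
  induction n with
  | zero => omega
  | succ n ih =>
    intro m _ hm
    have hsplit : (List.range (n+1)).map (fun j => pvBitChar m (n+1-1-j))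
        = (List.range n).map (fun j => pvBitChar (m/2) (n-1-j)) ++ [Nat.digitChar (m%2)] := by
      rw [List.range_succ, List.map_append]
      congr 1
      · apply List.map_congr_left
        intro j hj
        have hj' : j < n := List.mem_range.mp hj
        simp only [pvBitChar, Nat.testBit_div_two]
        have : n - 1 - j + 1 = n + 1 - 1 - j := by omega
        rw [this]
      · simp [pv_bitChar_zero]
    rw [hsplit]
    by_cases hlt : m < 2
    · rw [pv_toDigits_two_lt m hlt]
      have hz : m / 2 = 0 := by omega
      have hmm : m % 2 = m := by omega
      rw [hz, hmm]
      have : (List.range n).map (fun j => pvBitChar 0 (n-1-j))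
          = List.replicate n '0' := by
        rw [show (fun j => pvBitChar 0 (n-1-j)) = (fun _ => '0') from
              funext fun j => by simp [pvBitChar, Nat.zero_testBit]]
        simp [List.map_const']
      rw [this]
      simp
    · have hge : 2 ≤ m := by omega
      have hn : 0 < n := by
        by_contra hn0
        have : n = 0 := by omega
        subst this; simp at hm; omega
      rw [pv_toDigits_two_ge m hge]
      have hlen : (Nat.toDigits 2 (m/2) ++ [Nat.digitChar (m%2)]).length
          = (Nat.toDigits 2 (m/2)).length + 1 := by simp
      rw [hlen]
      have hsub : n + 1 - ((Nat.toDigits 2 (m/2)).length + 1)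
          = n - (Nat.toDigits 2 (m/2)).length := by omega
      rw [hsub, ← List.append_assoc, ih (m/2) hn (by omega)]

-- ---- counting rows with a fixed bit ----
theorem pv_countRange : ∀ (n s : Nat) (b : Bool), s < n →
    ((List.range (2^n)).filter (fun k => decide (Nat.testBit k s = b))).length = 2^(n-1) := by
  intro n
  induction n with
  | zero => omega
  | succ n ih =>
    intro s b hs
    have hsplit : List.range (2^(n+1)) = List.range (2^n) ++ (List.range (2^n)).map (fun x => 2^n + x) := by
      rw [← List.range_add]; congr 1; ring
    rw [hsplit, List.filter_append, List.filter_map, List.length_append, List.length_map]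
    by_cases hsn : s < n
    · have e : ((fun k => decide (Nat.testBit k s = b)) ∘ (fun x => 2^n + x)) = (fun k => decide (Nat.testBit k s = b)) := by
        funext k; simp only [Function.comp, Nat.testBit_two_pow_add_gt hsn]
      rw [e, ih s b hsn]
      have h1 : n + 1 - 1 = (n-1) + 1 := by omega
      rw [h1, pow_succ]
      omega
    · have hsn' : n = s := by omega
      subst hsn'
      have e1 : (List.range (2^n)).filter (fun k => decide (Nat.testBit k n = b))
          = (List.range (2^n)).filter (fun _ => decide (false = b)) := by
        apply List.filter_congr
        intro k hk
        rw [Nat.testBit_lt_two_pow (List.mem_range.mp hk)]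
      have e2 : (List.range (2^n)).filter ((fun k => decide (Nat.testBit k n = b)) ∘ (fun x => 2^n + x))
          = (List.range (2^n)).filter (fun _ => decide (true = b)) := by
        apply List.filter_congr
        intro x hx
        simp only [Function.comp]
        rw [Nat.testBit_two_pow_add_eq, Nat.testBit_lt_two_pow (List.mem_range.mp hx)]
        rfl
      rw [e1, e2]
      cases b <;> simp

-- ---- small evaluation facts ----
theorem pv_ofChars_zero : PySem.Int.ofChars? ['0'] = some 0 := by decide
theorem pv_ofChars_one : PySem.Int.ofChars? ['1'] = some 1 := by decide

theorem pv_update_single (out : PySem.Set Int) (i : Int) :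
    PySem.Set.update out (PySem.Set.ofList [i]) = PySem.Set.add out i := rfl

theorem pv_idxOf? {α : Type} [BEq α] [LawfulBEq α] (v : α) :
    ∀ (vs : List α), v ∈ vs → List.idxOf? v vs = some (List.idxOf v vs) := by
  intro vs hv
  induction vs with
  | nil => cases hv
  | cons x xs ih =>
    by_cases hx : x = v
    · subst hx
      simp [List.idxOf?_cons]
    · have hv' : v ∈ xs := by
        rcases List.mem_cons.mp hv with h | h
        · exact absurd h.symm hx
        · exact h
      have hbe : (x == v) = false := by simp [hx]
      simp [List.idxOf?_cons, List.idxOf_cons, hbe, ih hv']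

-- ---- the A-side digit test is a bit test ----
theorem pv_digit_eval (n ix k : Nat) (hn : 0 < n) (hix : ix < n) (hk : k < 2^n) (val : Bool) :
    (((PySem.Int.ofChars? [PySem.List.pyGetD
        (PySem.List.pyRepeat ['0'] ((n : Int) - ((PySem.List.slice (PySem.Int.toBinChars0b ((k : Nat) : Int)) (some 2) none).length : Nat))
          ++ PySem.List.slice (PySem.Int.toBinChars0b ((k : Nat) : Int)) (some 2) none)
        ((ix : Nat) : Int) ' ']).getD 0 = (if val then (1 : Int) else 0))
      ↔ (Nat.testBit k (n - 1 - ix) = val)) := by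
  have hb1 : PySem.List.slice (PySem.Int.toBinChars0b ((k : Nat) : Int)) (some 2) none
      = Nat.toDigits 2 k := by
    have h0 : PySem.Int.toBinChars0b ((k : Nat) : Int) = '0' :: 'b' :: Nat.toDigits 2 k := by
      simp [PySem.Int.toBinChars0b]
    rw [h0]
    simp [PySem.List.slice, PySem.List.clampIdx]
  rw [hb1]
  have hrep : PySem.List.pyRepeat ['0'] ((n : Int) - ((Nat.toDigits 2 k).length : Nat))
      = List.replicate (n - (Nat.toDigits 2 k).length) '0' := by
    rw [PySem.List.pyRepeat_singleton]
    congr 1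
    omega
  rw [hrep, pv_padbin n k hn hk]
  have hget : PySem.List.pyGetD ((List.range n).map (fun j => pvBitChar k (n-1-j))) ((ix : Nat) : Int) ' '
      = pvBitChar k (n-1-ix) := by
    rw [PySem.List.pyGetD_natCast]
    rw [List.getD_eq_getElem?_getD]
    simp [hix]
  rw [hget]
  cases h : Nat.testBit k (n-1-ix) <;> cases val <;>
    simp [pvBitChar, h, pv_ofChars_zero, pv_ofChars_one]

-- ---- possible rows, characterised ----
theorem pv_findRows_eq (vs : List String) (v : String) (val : Bool) (hv : v ∈ vs) :
    canalizeFindRows vs v val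
      = ((List.range (2^vs.length)).filter
          (fun k => decide (Nat.testBit k (vs.length - 1 - vs.idxOf v) = val))).map
          (fun k : Nat => (k : Int)) := by
  have hn : 0 < vs.length := List.length_pos_of_mem hv
  have hix : vs.idxOf v < vs.length := List.idxOf_lt_length_iff.mpr hv
  simp only [canalizeFindRows]
  rw [show PySem.List.index? vs v = some (vs.idxOf v) from pv_idxOf? v vs hv]
  simp only [Option.getD_some]
  rw [show ((2:Int) ^ vs.length) = ((2^vs.length : Nat) : Int) by push_cast; ring]
  rw [PySem.List.pyRange_zero_nat]
  simp only [pv_update_single]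
  rw [PySem.List.foldl_ite_eq_foldl_filter]
  rw [show (PySem.Set.empty : PySem.Set Int) = ([] : List Int) from rfl]
  rw [← PySem.Set.ofList_eq_foldl, List.filter_map]
  have hcong : ∀ k ∈ List.range (2^vs.length),
      ((fun i : Int => decide
          ((PySem.Int.ofChars? [PySem.List.pyGetD
              (PySem.List.pyRepeat ['0'] ((vs.length : Int) - ((PySem.List.slice (PySem.Int.toBinChars0b i) (some 2) none).length : Nat))
                ++ PySem.List.slice (PySem.Int.toBinChars0b i) (some 2) none)
              ((vs.idxOf v : Nat) : Int) ' ']).getD 0 = (if val then (1 : Int) else 0)))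
        ∘ (fun k : Nat => (k : Int))) k
        = decide (Nat.testBit k (vs.length - 1 - vs.idxOf v) = val) := by
    intro k hk
    simp only [Function.comp]
    exact decide_eq_decide.mpr
      (pv_digit_eval vs.length (vs.idxOf v) k hn hix (List.mem_range.mp hk) val)
  rw [List.filter_congr hcong]
  apply PySem.Set.ofList_eq_self_of_nodup
  apply List.Nodup.map
  · exact fun a b h => by exact_mod_cast h
  · exact List.Nodup.filter _ List.nodup_range

theorem pv_possible_nodup (vs : List String) (v : String) (val : Bool) (hv : v ∈ vs) :
    (canalizeFindRows vs v val).Nodup := by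
  rw [pv_findRows_eq vs v val hv]
  apply List.Nodup.map
  · exact fun a b h => by exact_mod_cast h
  · exact List.Nodup.filter _ List.nodup_range

-- ---- B's bit test, characterised ----
theorem pv_q_iff (k s : Nat) (val : Bool) :
    (PySem.Int.band (((k : Nat) : Int) >>> s) 1 = (if val then (1 : Int) else 0)) ↔ (Nat.testBit k s = val) := by
  rw [← Int.natCast_shiftRight]
  rw [show (1 : Int) = ((1 : Nat) : Int) by simp, PySem.Int.band_natCast]
  rw [Nat.and_one_is_mod]
  unfold Nat.testBit
  rw [Nat.one_and_eq_mod_two]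
  rcases Nat.mod_two_eq_zero_or_one (k >>> s) with h | h <;> cases val <;>
    simp [h]

-- ---- the count equals the overlap size ----
theorem pv_cnt_eq (ms : List Int) (vs : List String) (v : String) (val : Bool) (hv : v ∈ vs) :
    canalizeAltCount (PySem.Set.ofList (ms.filter (fun m => decide (0 ≤ m ∧ m < 2^vs.length))))
        ((vs.length : Int) - 1 - ((vs.idxOf v : Nat) : Int)) val
      = ((PySem.Set.inter (canalizeFindRows vs v val) (PySem.Set.ofList ms)).length : Int) := by
  have hn : 0 < vs.length := List.length_pos_of_mem hv
  have hix : vs.idxOf v < vs.length := List.idxOf_lt_length_iff.mpr hv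
  have htn : ((vs.length : Int) - 1 - ((vs.idxOf v : Nat) : Int)).toNat
      = vs.length - 1 - vs.idxOf v := by omega
  simp only [canalizeAltCount]
  rw [htn, PySem.List.foldl_ite_add_one]
  rw [List.countP_eq_length_filter]
  have hnd1 : ((PySem.Set.ofList (ms.filter (fun m => decide (0 ≤ m ∧ m < 2^vs.length)))).filter
      (fun m : Int => decide (PySem.Int.band (m >>> (vs.length - 1 - vs.idxOf v)) 1
        = (if val then (1:Int) else 0)))).Nodup :=
    (PySem.Set.nodup_ofList _).filter _
  have hnd2 : (PySem.Set.inter (canalizeFindRows vs v val) (PySem.Set.ofList ms)).Nodup :=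
    PySem.Set.nodup_inter _ _ (pv_possible_nodup vs v val hv)
  have hmem : ∀ x : Int,
      x ∈ (PySem.Set.ofList (ms.filter (fun m => decide (0 ≤ m ∧ m < 2^vs.length)))).filter
        (fun m : Int => decide (PySem.Int.band (m >>> (vs.length - 1 - vs.idxOf v)) 1
          = (if val then (1:Int) else 0)))
      ↔ x ∈ PySem.Set.inter (canalizeFindRows vs v val) (PySem.Set.ofList ms) := by
    intro x
    rw [List.mem_filter, PySem.Set.mem_ofList, List.mem_filter,
        PySem.Set.mem_inter, PySem.Set.mem_ofList, pv_findRows_eq vs v val hv,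
        List.mem_map]
    constructor
    · rintro ⟨⟨hxm, hr⟩, hq⟩
      have hr' : 0 ≤ x ∧ x < (2:Int)^vs.length := by simpa using hr
      refine ⟨⟨x.toNat, ?_, ?_⟩, hxm⟩
      · rw [List.mem_filter, List.mem_range]
        constructor
        · have : ((2:Int)^vs.length) = ((2^vs.length : Nat) : Int) := by push_cast; ring
          omega
        · rw [decide_eq_true_eq]
          rw [← pv_q_iff x.toNat (vs.length - 1 - vs.idxOf v) val]
          rw [show ((x.toNat : Nat) : Int) = x by omega]
          exact decide_eq_true_eq.mp hq
      · omega
    · rintro ⟨⟨k, hk, hkx⟩, hxm⟩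
      rw [List.mem_filter, List.mem_range, decide_eq_true_eq] at hk
      subst hkx
      refine ⟨⟨hxm, ?_⟩, ?_⟩
      · rw [decide_eq_true_eq]
        have : ((2:Int)^vs.length) = ((2^vs.length : Nat) : Int) := by push_cast; ring
        omega
      · rw [decide_eq_true_eq, pv_q_iff k (vs.length - 1 - vs.idxOf v) val]
        exact hk.2
  have hperm := (List.perm_ext_iff_of_nodup hnd1 hnd2).mpr hmem
  rw [hperm.length_eq]
  simp

-- ---- per-variable, per-value agreement ----
theorem pv_try_eq (ms : List Int) (vs : List String) (v : String) (val : Bool) (hv : v ∈ vs) :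
    canalizeAltTry (PySem.Set.ofList (ms.filter (fun m => decide (0 ≤ m ∧ m < 2^vs.length))))
        ((vs.length : Int) - 1 - ((vs.idxOf v : Nat) : Int))
        (PySem.Int.floordiv (2^vs.length) 2) v val
      = (canalizeCheck ms vs v val).map (fun c => ((if !val then "NOT " else "") ++ v, c)) := by
  have hn : 0 < vs.length := List.length_pos_of_mem hv
  have hix : vs.idxOf v < vs.length := List.idxOf_lt_length_iff.mpr hv
  have hposs_nd := pv_possible_nodup vs v val hv
  have hposs_len : (canalizeFindRows vs v val).length = 2^(vs.length - 1) := by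
    rw [pv_findRows_eq vs v val hv, List.length_map, pv_countRange _ _ _ (by omega)]
  have hhalf : PySem.Int.floordiv ((2:Int)^vs.length) 2 = ((2^(vs.length-1) : Nat) : Int) := by
    rw [PySem.Int.floordiv_eq_ediv_of_pos (by norm_num)]
    rw [show ((2:Int)^vs.length) = ((2^(vs.length-1):Nat):Int) * 2 by
          push_cast; rw [← pow_succ]; congr 1; omega]
    exact Int.mul_ediv_cancel _ (by norm_num)
  have hnd2 : (PySem.Set.inter (canalizeFindRows vs v val) (PySem.Set.ofList ms)).Nodup :=
    PySem.Set.nodup_inter _ _ hposs_nd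
  have hsub : ∀ a : Int, a ∈ PySem.Set.inter (canalizeFindRows vs v val) (PySem.Set.ofList ms) →
      a ∈ canalizeFindRows vs v val :=
    fun a ha => ((PySem.Set.mem_inter _ _ _).mp ha).1
  have h1 : (PySem.Set.equal (PySem.Set.inter (canalizeFindRows vs v val) (PySem.Set.ofList ms))
        PySem.Set.empty = true)
      ↔ (PySem.Set.inter (canalizeFindRows vs v val) (PySem.Set.ofList ms)).length = 0 := by
    rw [PySem.Set.equal_iff, List.length_eq_zero_iff, List.eq_nil_iff_forall_not_mem]
    constructor
    · intro h x hx
      exact absurd ((h x).mp hx) (List.not_mem_nil)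
    · intro h x
      constructor
      · intro hx; exact absurd hx (h x)
      · intro hx; exact absurd hx (List.not_mem_nil)
  have h2 : (PySem.Set.equal (PySem.Set.inter (canalizeFindRows vs v val) (PySem.Set.ofList ms))
        (canalizeFindRows vs v val) = true)
      ↔ (PySem.Set.inter (canalizeFindRows vs v val) (PySem.Set.ofList ms)).length
          = 2^(vs.length-1) := by
    rw [PySem.Set.equal_iff]
    constructor
    · intro h
      have hp := (List.perm_ext_iff_of_nodup hnd2 hposs_nd).mpr h
      rw [hp.length_eq, hposs_len]
    · intro hlen
      have hfs : (PySem.Set.inter (canalizeFindRows vs v val) (PySem.Set.ofList ms)).toFinset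
          = (canalizeFindRows vs v val).toFinset := by
        apply Finset.eq_of_subset_of_card_le
        · intro a ha
          exact List.mem_toFinset.mpr (hsub a (List.mem_toFinset.mp ha))
        · rw [List.toFinset_card_of_nodup hnd2, List.toFinset_card_of_nodup hposs_nd,
              hposs_len, hlen]
      intro x
      constructor
      · intro hx; exact List.mem_toFinset.mp (hfs ▸ List.mem_toFinset.mpr hx)
      · intro hx; exact List.mem_toFinset.mp (hfs ▸ List.mem_toFinset.mpr hx)
  simp only [canalizeAltTry, canalizeCheck]
  rw [pv_cnt_eq ms vs v val hv, hhalf]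
  by_cases hz : (PySem.Set.inter (canalizeFindRows vs v val) (PySem.Set.ofList ms)).length = 0
  · rw [if_pos (by exact_mod_cast hz), if_pos (h1.mpr hz)]
    rfl
  · rw [if_neg (by exact_mod_cast hz), if_neg (fun hh => hz (h1.mp hh))]
    by_cases hh : (PySem.Set.inter (canalizeFindRows vs v val) (PySem.Set.ofList ms)).length
        = 2^(vs.length-1)
    · rw [if_pos (by exact_mod_cast hh), if_pos (h2.mpr hh)]
      rfl
    · rw [if_neg (by exact_mod_cast hh), if_neg (fun he => hh (h2.mp he))]
      rfl

-- ---- the first-index dictionary ----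
theorem pv_dict_preserve (l : List (Int × String)) (d : PySem.Dict String Int) (v : String)
    (hc : d.contains v = true) :
    (l.foldl (fun d p => if d.contains p.2 then d else d.insert p.2 p.1) d).get? v = d.get? v := by
  induction l generalizing d with
  | nil => rfl
  | cons p t ih =>
    simp only [List.foldl_cons]
    by_cases h : d.contains p.2
    · rw [if_pos h]; exact ih d hc
    · rw [if_neg h]
      have hne : v ≠ p.2 := fun he => h (he ▸ hc)
      have hc' : (d.insert p.2 p.1).contains v = true := by
        rw [PySem.Dict.contains_eq_isSome_get?, PySem.Dict.get?_insert_of_ne _ _ hne,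
            ← PySem.Dict.contains_eq_isSome_get?]
        exact hc
      rw [ih _ hc', PySem.Dict.get?_insert_of_ne _ _ hne]

theorem pv_dict_firstIx : ∀ (vs : List String) (k : Int) (d : PySem.Dict String Int) (v : String),
    v ∈ vs → d.contains v = false →
    ((PySem.List.enumerate vs k).foldl
        (fun d p => if d.contains p.2 then d else d.insert p.2 p.1) d).get? v
      = some (k + (List.idxOf v vs : Nat)) := by
  intro vs
  induction vs with
  | nil => intro _ _ _ h; cases h
  | cons x xs ih =>
    intro k d v hv hc
    rw [show PySem.List.enumerate (x :: xs) k = (k, x) :: PySem.List.enumerate xs (k+1) from rfl]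
    simp only [List.foldl_cons]
    by_cases hx : x = v
    · subst hx
      rw [if_neg (by simp [hc])]
      have hc2 : (d.insert x k).contains x = true := by
        rw [PySem.Dict.contains_eq_isSome_get?, PySem.Dict.get?_insert_self]; rfl
      rw [pv_dict_preserve _ _ _ hc2, PySem.Dict.get?_insert_self]
      rw [List.idxOf_cons_eq xs rfl]
      simp
    · have hv' : v ∈ xs := by
        rcases List.mem_cons.mp hv with h | h
        · exact absurd h.symm hx
        · exact h
      have hstep : ∀ (d' : PySem.Dict String Int), d'.contains v = false →
          ((PySem.List.enumerate xs (k+1)).foldl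
              (fun d p => if d.contains p.2 then d else d.insert p.2 p.1) d').get? v
            = some ((k+1) + (List.idxOf v xs : Nat)) := fun d' h' => ih (k+1) d' v hv' h'
      have hres : ((if d.contains x then d else d.insert x k)).contains v = false := by
        by_cases hdx : d.contains x = true
        · rw [if_pos hdx]; exact hc
        · rw [if_neg hdx]
          rw [PySem.Dict.contains_eq_isSome_get?,
              PySem.Dict.get?_insert_of_ne _ _ (fun he : v = x => hx he.symm),
              ← PySem.Dict.contains_eq_isSome_get?]
          exact hc
      rw [hstep _ hres, List.idxOf_cons_ne xs hx]
      congr 1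
      push_cast
      ring

-- ---- the loops agree ----
theorem pv_loop_eq (ms : List Int) (vs : List String) :
    ∀ (sub : List String), (∀ x ∈ sub, x ∈ vs) →
    canalizeLoop ms vs sub
      = canalizeAltLoop (PySem.Set.ofList (ms.filter (fun m => decide (0 ≤ m ∧ m < 2^vs.length))))
          ((PySem.List.enumerate vs).foldl
            (fun d p => if d.contains p.2 then d else d.insert p.2 p.1) PySem.Dict.empty)
          vs.length (PySem.Int.floordiv (2^vs.length) 2) sub := by
  intro sub
  induction sub with
  | nil => intro _; rfl
  | cons v rest ih =>
    intro h
    have hv : v ∈ vs := h v (by simp)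
    have hD : ((PySem.List.enumerate vs).foldl
        (fun d p => if d.contains p.2 then d else d.insert p.2 p.1) PySem.Dict.empty).getD v 0
        = ((List.idxOf v vs : Nat) : Int) := by
      rw [PySem.Dict.getD_eq_get?_getD, pv_dict_firstIx vs 0 PySem.Dict.empty v hv (by rfl)]
      simp
    simp only [canalizeLoop, canalizeAltLoop, hD]
    rw [pv_try_eq ms vs v false hv, pv_try_eq ms vs v true hv]
    cases canalizeCheck ms vs v false with
    | some c => simp [canalizeExtra]
    | none =>
      cases canalizeCheck ms vs v true with
      | some c => simp [canalizeExtra]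
      | none =>
        simp only [Option.map_none]
        exact ih (fun x hx => h x (List.mem_cons_of_mem v hx))

-- ===== VERDICT (by name: the statement is the Claim_ definition above) =====
theorem canalize_spec : Claim_equal_canalize := by
  intro m _
  unfold Spec_canalize canalize canalize_alt
  exact pv_loop_eq m.1 m.2 m.2 (fun x hx => hx)
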